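-- pv_equiv track=rewrite | github.com/Sodiride123/ninja-stock-analyzer | skills/get_numbers.py | _find_financial_pages
-- ===== SOURCE A (Python) =====
-- def _find_financial_pages(full_text: str) -> str:
--     """
--     Use [page X] markers to locate financial statement pages.
--     Returns a focused excerpt around the financial tables.
--     """
--     markers = [
--         "CONSOLIDATED BALANCE SHEET",
--         "CONSOLIDATED STATEMENTS OF INCOME",
--         "CONSOLIDATED STATEMENTS OF OPERATIONS",
--         "CONSOLIDATED STATEMENTS OF COMPREHENSIVE INCOME",
--         "CONSOLIDATED STATEMENTS OF CASH FLOWS",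
--         "CONDENSED CONSOLIDATED BALANCE SHEET",
--         "CONDENSED CONSOLIDATED STATEMENTS OF INCOME",
--         "CONDENSED CONSOLIDATED STATEMENTS OF OPERATIONS",
--         "CONDENSED CONSOLIDATED STATEMENTS OF CASH FLOWS",
--         "FINANCIAL STATEMENTS",
--         "Balance Sheets",
--         "Statements of Income",
--         "Statements of Operations",
--         "Statements of Cash Flows",
--         "Revenue",
--         "Total revenue",
--         "Net income",
--         "Earnings per share",
--     ]
--
--     text_upper = full_text.upper()
--     found_positions = []
--
--     for marker in markers:
--         pos = text_upper.find(marker.upper())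
--         if pos != -1:
--             found_positions.append(pos)
--
--     if found_positions:
--         # Start slightly before the earliest marker
--         start = max(0, min(found_positions) - 500)
--         # Take a generous chunk
--         excerpt = full_text[start:start + 30000]
--         return excerpt
--
--     # Fallback: return the middle-to-end section where financials usually are
--     mid = len(full_text) // 3
--     return full_text[mid:mid + 30000]
-- ===== SOURCE B (Python) =====
-- import re
--
-- _MARKERS = [
--     "CONSOLIDATED BALANCE SHEET",
--     "CONSOLIDATED STATEMENTS OF INCOME",
--     "CONSOLIDATED STATEMENTS OF OPERATIONS",
--     "CONSOLIDATED STATEMENTS OF COMPREHENSIVE INCOME",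
--     "CONSOLIDATED STATEMENTS OF CASH FLOWS",
--     "CONDENSED CONSOLIDATED BALANCE SHEET",
--     "CONDENSED CONSOLIDATED STATEMENTS OF INCOME",
--     "CONDENSED CONSOLIDATED STATEMENTS OF OPERATIONS",
--     "CONDENSED CONSOLIDATED STATEMENTS OF CASH FLOWS",
--     "FINANCIAL STATEMENTS",
--     "Balance Sheets",
--     "Statements of Income",
--     "Statements of Operations",
--     "Statements of Cash Flows",
--     "Revenue",
--     "Total revenue",
--     "Net income",
--     "Earnings per share",
-- ]
--
-- _PATTERN = re.compile("|".join(re.escape(m) for m in _MARKERS), re.IGNORECASE)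
--
--
-- def _find_financial_pages(full_text: str) -> str:
--     """Single leftmost-match regex search instead of one find() per marker."""
--     match = _PATTERN.search(full_text)
--     if match:
--         start = max(0, match.start() - 500)
--         return full_text[start:start + 30000]
--     mid = len(full_text) // 3
--     return full_text[mid:mid + 30000]
-- ===== Notes on version B (the rewrite author's own statement) =====
-- stated objective: idiomatic
-- what changed: Replaces the per-marker str.find loop plus min() with one precompiled case-insensitive alternation regex whose single .search gives the leftmost marker position directly.
import Mathlib
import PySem

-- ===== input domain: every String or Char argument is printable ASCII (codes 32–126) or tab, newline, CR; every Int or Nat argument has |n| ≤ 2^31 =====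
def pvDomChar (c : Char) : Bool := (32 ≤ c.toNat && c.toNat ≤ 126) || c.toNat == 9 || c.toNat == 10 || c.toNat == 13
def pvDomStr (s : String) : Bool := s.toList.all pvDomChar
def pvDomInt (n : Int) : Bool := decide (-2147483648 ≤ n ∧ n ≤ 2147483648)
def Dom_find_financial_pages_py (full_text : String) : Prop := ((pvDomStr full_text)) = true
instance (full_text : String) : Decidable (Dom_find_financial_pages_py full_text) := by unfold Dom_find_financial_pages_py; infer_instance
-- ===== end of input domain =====

-- B replaces the per-marker find loop + min() with one case-insensitive leftmost-match
-- scan (a precompiled alternation regex in Python); same return value, idiomatic objective.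

def pvMarkers : List String := [
  "CONSOLIDATED BALANCE SHEET",
  "CONSOLIDATED STATEMENTS OF INCOME",
  "CONSOLIDATED STATEMENTS OF OPERATIONS",
  "CONSOLIDATED STATEMENTS OF COMPREHENSIVE INCOME",
  "CONSOLIDATED STATEMENTS OF CASH FLOWS",
  "CONDENSED CONSOLIDATED BALANCE SHEET",
  "CONDENSED CONSOLIDATED STATEMENTS OF INCOME",
  "CONDENSED CONSOLIDATED STATEMENTS OF OPERATIONS",
  "CONDENSED CONSOLIDATED STATEMENTS OF CASH FLOWS",
  "FINANCIAL STATEMENTS",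
  "Balance Sheets",
  "Statements of Income",
  "Statements of Operations",
  "Statements of Cash Flows",
  "Revenue",
  "Total revenue",
  "Net income",
  "Earnings per share"]

-- ===== PORT A =====
def find_financial_pages_py (full_text : String) : String :=
  let text_upper := PySem.Str.upper full_text
  let found_positions : List Int := pvMarkers.foldl (fun acc marker =>
      let pos := PySem.Str.find text_upper (PySem.Str.upper marker)
      if pos ≠ -1 then acc ++ [pos] else acc) []
  match PySem.List.min? found_positions (fun x => x) with   -- `if found_positions:` + min(found_positions)
  | some m =>
      let start := max 0 (m - 500)
      PySem.Str.slice full_text (some start) (some (start + 30000))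
  | none =>
      let mid := PySem.Int.floordiv (PySem.Str.len full_text) 3
      PySem.Str.slice full_text (some mid) (some (mid + 30000))

-- ===== PORT B =====
-- `_PATTERN.search(full_text)` on a literal alternation with re.IGNORECASE is exactly the
-- leftmost position at which some marker matches case-insensitively (exact on the ASCII domain):
-- ported as this left-to-right scan returning the first matching index.
def pvScan (mu : List (List Char)) : Nat → List Char → Option Nat
  | i, [] =>
      if mu.any (fun m => PySem.Chars.startswith (PySem.Chars.upper []) m) then some i else none
  | i, c :: t =>
      if mu.any (fun m => PySem.Chars.startswith (PySem.Chars.upper (c :: t)) m) then some i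
      else pvScan mu (i + 1) t

def find_financial_pages_py_alt (full_text : String) : String :=
  match pvScan (pvMarkers.map (fun m => PySem.Chars.upper m.toList)) 0 full_text.toList with
  | some p =>
      let start := max 0 ((p : Int) - 500)
      PySem.Str.slice full_text (some start) (some (start + 30000))
  | none =>
      let mid := PySem.Int.floordiv (PySem.Str.len full_text) 3
      PySem.Str.slice full_text (some mid) (some (mid + 30000))

-- ===== PRECONDITION & SPEC =====
def Spec_find_financial_pages_py (full_text : String) (out : String) : Prop := out = find_financial_pages_py_alt full_text
instance (full_text : String) (out : String) : Decidable (Spec_find_financial_pages_py full_text out) := by unfold Spec_find_financial_pages_py; infer_instance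

-- ===== CLAIM (what is proved, stated in full; the proofs are below) =====
def Claim_equal_find_financial_pages_py : Prop := ∀ (full_text : String), Dom_find_financial_pages_py full_text → Spec_find_financial_pages_py full_text (find_financial_pages_py full_text)

-- ===== LEMMAS AND PROOFS =====

-- matchAt mu l : some (uppercased) marker is a prefix of the uppercased list l
def pvMatch (mu : List (List Char)) (l : List Char) : Bool :=
  mu.any (fun m => PySem.Chars.startswith (PySem.Chars.upper l) m)

lemma pvMatch_drop (mu : List (List Char)) (l : List Char) (j : Nat) :
    pvMatch mu (l.drop j) = true ↔ ∃ m ∈ mu, m <+: (PySem.Chars.upper l).drop j := by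
  simp [pvMatch, List.any_eq_true, PySem.Chars.startswith_iff, PySem.Chars.upper,
    List.map_drop]

lemma pvScan_none (mu : List (List Char)) :
    ∀ (l : List Char) (i : Nat), pvScan mu i l = none → ∀ j, pvMatch mu (l.drop j) = false := by
  intro l
  induction l with
  | nil =>
      intro i h j
      simp only [pvScan] at h
      split at h
      next hc => exact absurd h (by simp)
      next hc =>
        simp only [List.drop_nil]
        unfold pvMatch
        exact Bool.eq_false_iff.mpr hc
  | cons c t ih =>
      intro i h j
      simp only [pvScan] at h
      split at h
      next hc => exact absurd h (by simp)
      next hc =>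
        cases j with
        | zero =>
            simp only [List.drop_zero]
            unfold pvMatch
            exact Bool.eq_false_iff.mpr hc
        | succ j' => simpa using ih (i + 1) h j'

lemma pvScan_some (mu : List (List Char)) :
    ∀ (l : List Char) (i p : Nat), pvScan mu i l = some p →
      i ≤ p ∧ pvMatch mu (l.drop (p - i)) = true ∧ ∀ j, j < p - i → pvMatch mu (l.drop j) = false := by
  intro l
  induction l with
  | nil =>
      intro i p h
      simp only [pvScan] at h
      split at h
      next hc =>
        cases h
        refine ⟨le_refl _, ?_, ?_⟩
        · simp only [Nat.sub_self, List.drop_nil]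
          unfold pvMatch; exact hc
        · intro j hj; omega
      next hc => exact absurd h (by simp)
  | cons c t ih =>
      intro i p h
      simp only [pvScan] at h
      split at h
      next hc =>
        cases h
        refine ⟨le_refl _, ?_, ?_⟩
        · simp only [Nat.sub_self, List.drop_zero]
          unfold pvMatch; exact hc
        · intro j hj; omega
      next hc =>
        obtain ⟨h1, h2, h3⟩ := ih (i + 1) p h
        refine ⟨by omega, ?_, ?_⟩
        · have : (c :: t).drop (p - i) = t.drop (p - (i + 1)) := by
            have : p - i = (p - (i + 1)) + 1 := by omega
            simp [this]
          rw [this]; exact h2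
        · intro j hj
          cases j with
          | zero =>
              simp only [List.drop_zero]
              unfold pvMatch; exact Bool.eq_false_iff.mpr hc
          | succ j' =>
              have : (c :: t).drop (j' + 1) = t.drop j' := by simp
              rw [this]; exact h3 j' (by omega)

-- A's accumulation loop is a filter-map
lemma pvFoldl_filter (f : String → Int) :
    ∀ (l : List String) (acc : List Int),
      l.foldl (fun acc m => if f m ≠ -1 then acc ++ [f m] else acc) acc
        = acc ++ (l.filter (fun m => f m ≠ -1)).map f := by
  intro l
  induction l with
  | nil => intro acc; simp
  | cons m t ih =>
      intro acc
      rw [List.foldl_cons, ih]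
      by_cases h : f m = -1 <;> simp [h]

-- characterisation of Python str.find as the LEAST matching index
lemma pvFind_spec (s sub : List Char) (h : PySem.Chars.find s sub ≠ -1) :
    sub <+: s.drop (PySem.Chars.find s sub).toNat ∧
      ∀ i, i < (PySem.Chars.find s sub).toNat → ¬ sub <+: s.drop i := by
  have h' : PySem.Chars.findFrom s sub ((0 : Nat) : Int) = PySem.Chars.find s sub := by
    exact PySem.Chars.findFrom_zero s sub
  obtain ⟨_, h2, h3⟩ := PySem.Chars.findFrom_natCast_spec s sub 0 (Nat.zero_le _) (by rw [h']; exact h)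
  rw [h'] at h2 h3
  exact ⟨h2, fun i hi => h3 i (Nat.zero_le _) hi⟩

lemma pvFind_nonneg (s sub : List Char) (h : PySem.Chars.find s sub ≠ -1) :
    0 ≤ PySem.Chars.find s sub := by
  have := PySem.Chars.neg_one_le_find s sub
  omega

-- main bridge: the scan result determines A's min() of per-marker finds
lemma pvScan_min (full_text : String) :
    let U := PySem.Chars.upper full_text.toList
    let found := (pvMarkers.filter (fun m => PySem.Chars.find U (PySem.Chars.upper m.toList) ≠ -1)).map
        (fun m => PySem.Chars.find U (PySem.Chars.upper m.toList))
    (∀ p, pvScan (pvMarkers.map (fun m => PySem.Chars.upper m.toList)) 0 full_text.toList = some p →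
        PySem.List.min? found (fun x => x) = some ((p : Nat) : Int)) ∧
    (pvScan (pvMarkers.map (fun m => PySem.Chars.upper m.toList)) 0 full_text.toList = none →
        found = []) := by
  intro U found
  set mu := pvMarkers.map (fun m => PySem.Chars.upper m.toList) with hmu
  constructor
  · intro p hscan
    obtain ⟨_, hm, hmin⟩ := pvScan_some mu full_text.toList 0 p hscan
    simp only [Nat.sub_zero] at hm hmin
    -- the matching marker m₀
    rw [pvMatch_drop] at hm
    obtain ⟨mU, hmUmem, hpref⟩ := hm
    obtain ⟨m₀, hm₀mem, rfl⟩ := List.mem_map.mp (hmu ▸ hmUmem)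
    -- find for m₀ equals p
    have hne : PySem.Chars.find U (PySem.Chars.upper m₀.toList) ≠ -1 := by
      rw [Ne, PySem.Chars.find_eq_neg_one_iff]
      intro hninf
      exact hninf ((PySem.Chars.isIn_iff_infix _ _).mp
        ((PySem.Chars.exists_prefix_drop_iff_isIn _ _).mp ⟨p, hpref⟩))
    obtain ⟨hat, hlt⟩ := pvFind_spec U _ hne
    have h0 : 0 ≤ PySem.Chars.find U (PySem.Chars.upper m₀.toList) := pvFind_nonneg _ _ hne
    -- every marker with a hit has find ≥ p, and no prefix strictly before p for anyone
    have hnopre : ∀ j, j < p → ∀ mU' ∈ mu, ¬ mU' <+: U.drop j := by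
      intro j hj mU' hmem hpre
      have := (pvMatch_drop mu full_text.toList j).mpr ⟨mU', hmem, hpre⟩
      rw [hmin j hj] at this
      exact absurd this (by simp)
    have hfp : (PySem.Chars.find U (PySem.Chars.upper m₀.toList)).toNat = p := by
      by_contra hnep
      rcases Nat.lt_or_ge (PySem.Chars.find U (PySem.Chars.upper m₀.toList)).toNat p with hlt' | hge
      · exact hnopre _ hlt' _ hmUmem hat
      · exact hlt p (by omega) hpref
    have hfindp : PySem.Chars.find U (PySem.Chars.upper m₀.toList) = ((p : Nat) : Int) := by omega
    -- membership of p in found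
    have hpmem : ((p : Nat) : Int) ∈ found := by
      rw [← hfindp]
      exact List.mem_map.mpr ⟨m₀, List.mem_filter.mpr ⟨hm₀mem, by simpa using hne⟩, rfl⟩
    -- every element of found is ≥ p
    have hge : ∀ x ∈ found, ((p : Nat) : Int) ≤ x := by
      intro x hx
      obtain ⟨m', hm'f, rfl⟩ := List.mem_map.mp hx
      obtain ⟨hm'mem, htest⟩ := List.mem_filter.mp hm'f
      have hne' : PySem.Chars.find U (PySem.Chars.upper m'.toList) ≠ -1 := by simpa using htest
      obtain ⟨hat', _⟩ := pvFind_spec U _ hne'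
      have h0' := pvFind_nonneg U _ hne'
      have : ¬ (PySem.Chars.find U (PySem.Chars.upper m'.toList)).toNat < p := by
        intro hlt''
        exact hnopre _ hlt'' _ (hmu ▸ List.mem_map.mpr ⟨m', hm'mem, rfl⟩) hat'
      omega
    -- conclude min? = some p
    cases hmq : PySem.List.min? found (fun x => x) with
    | none =>
        rw [PySem.List.min?_eq_none_iff] at hmq
        rw [hmq] at hpmem; exact absurd hpmem (by simp)
    | some v =>
        have hv1 := PySem.List.min?_mem hmq
        have hv2 := PySem.List.min?_isMin hmq ((p : Nat) : Int) hpmem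
        have := hge v hv1
        congr 1; omega
  · intro hscan
    have hnom := pvScan_none mu full_text.toList 0 hscan
    have hall : ∀ m ∈ pvMarkers, PySem.Chars.find U (PySem.Chars.upper m.toList) = -1 := by
      intro m hm
      rw [PySem.Chars.find_eq_neg_one_iff]
      intro hinf
      obtain ⟨j, hpref⟩ := (PySem.Chars.exists_prefix_drop_iff_isIn _ _).mpr
        ((PySem.Chars.isIn_iff_infix _ _).mpr hinf)
      have := (pvMatch_drop mu full_text.toList j).mpr
        ⟨_, hmu ▸ List.mem_map.mpr ⟨m, hm, rfl⟩, hpref⟩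
      rw [hnom j] at this
      exact absurd this (by simp)
    have hfilt : pvMarkers.filter (fun m => PySem.Chars.find U (PySem.Chars.upper m.toList) ≠ -1) = [] := by
      rw [List.filter_eq_nil_iff]
      intro m hm
      simp [hall m hm]
    simp only [found, hfilt, List.map_nil]

-- ===== VERDICT (by name: the statement is the Claim_ definition above) =====
theorem find_financial_pages_py_spec : Claim_equal_find_financial_pages_py := by
  intro full_text _
  unfold Spec_find_financial_pages_py find_financial_pages_py find_financial_pages_py_alt
  -- rewrite A's loop into the filter-map form over Chars
  have hfold := pvFoldl_filter
    (fun m => PySem.Chars.find (PySem.Chars.upper full_text.toList) (PySem.Chars.upper m.toList))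
    pvMarkers []
  have hbridge : (fun (acc : List Int) marker =>
      let pos := PySem.Str.find (PySem.Str.upper full_text) (PySem.Str.upper marker)
      if pos ≠ -1 then acc ++ [pos] else acc)
      = (fun acc m =>
        if PySem.Chars.find (PySem.Chars.upper full_text.toList) (PySem.Chars.upper m.toList) ≠ -1
        then acc ++ [PySem.Chars.find (PySem.Chars.upper full_text.toList) (PySem.Chars.upper m.toList)]
        else acc) := by
    funext acc m; simp
  obtain ⟨hsome, hnone⟩ := pvScan_min full_text
  cases hscan : pvScan (pvMarkers.map (fun m => PySem.Chars.upper m.toList)) 0 full_text.toList with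
  | none =>
      simp only [hbridge, hfold, List.nil_append, hnone hscan]
      rfl
  | some p =>
      simp only [hbridge, hfold, List.nil_append, hsome p hscan]
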